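-- pv_equiv track=rewrite | github.com/Tony-yujingtian/TheAnalyzedWebsiteOfEcnomics | economic/test/defff.py | qu_chong
-- ===== SOURCE A (Python) =====
-- def qu_chong(l,default):
--     result=[]
--     for j in range(len(l)):
--         result.append([])
--     for i in range(len(l[0])):
--         ifn=1
--         for j in range(len(l)):
--             if l[j][i][1]==default:
--                 ifn=0
--         if ifn==1:
--             for j in range(len(l)):
--                 result[j].append(l[j][i][1])
--     return result
-- ===== SOURCE B (Python) =====
-- def qu_chong(l, default):
--     w = len(l[0])
--
--     def go(rows):
--         # recursive column-stripping: handle the first column, recurse on the rest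
--         if not rows or not rows[0]:
--             return [[] for _ in rows]
--         heads = [r[0][1] for r in rows]
--         tails = go([r[1:] for r in rows])
--         if default in heads:
--             return tails
--         return [[h] + t for h, t in zip(heads, tails)]
--
--     return go([r[:w] for r in l])
-- ===== Notes on version B (the rewrite author's own statement) =====
-- stated objective: alternative
-- what changed: A iterates column indices over pre-created mutable row buckets with an integer flag; B is a recursive column-stripping function that processes the first column (drop it if any second component equals default, else cons its values onto the recursive result) and recurses on the rows' tails, with no index arithmetic at all.
import Mathlib
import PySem

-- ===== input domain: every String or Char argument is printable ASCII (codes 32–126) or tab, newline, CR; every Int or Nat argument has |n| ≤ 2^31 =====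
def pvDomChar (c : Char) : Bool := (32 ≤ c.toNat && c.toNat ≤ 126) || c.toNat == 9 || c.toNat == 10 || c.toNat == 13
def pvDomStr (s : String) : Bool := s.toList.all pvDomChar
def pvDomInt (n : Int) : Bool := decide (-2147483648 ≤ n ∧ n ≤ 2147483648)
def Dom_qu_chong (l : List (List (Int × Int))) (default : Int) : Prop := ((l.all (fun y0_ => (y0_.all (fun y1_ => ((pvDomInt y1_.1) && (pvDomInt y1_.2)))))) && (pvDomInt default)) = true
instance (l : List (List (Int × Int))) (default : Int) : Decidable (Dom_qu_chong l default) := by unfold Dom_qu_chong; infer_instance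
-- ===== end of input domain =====

-- B replaces A's indexed flag-scan-and-append loops by a recursive column-stripping
-- function with no index arithmetic (objective: alternative).

-- ===== PORT A =====
-- literal transliteration of A: pre-create one empty row per input row, then for each
-- column index compute the flag ifn and, if it stayed 1, append that column's second
-- components to every row (the positional per-j append is the zipWith with l).
def qu_chong (l : List (List (Int × Int))) (default : Int) : List (List Int) :=
  let result : List (List Int) := l.map (fun _ => [])
  (PySem.List.pyRange 0 ((l.headD []).length : Int) 1).foldl
    (fun result i =>
      let ifn : Int :=
        l.foldl (fun ifn row =>
          if (PySem.List.pyGetD row i ((0 : Int), (0 : Int))).2 = default then 0 else ifn) 1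
      if ifn = 1 then
        List.zipWith (fun r row => r ++ [(PySem.List.pyGetD row i ((0 : Int), (0 : Int))).2]) result l
      else result)
    result

-- ===== PORT B =====
-- literal transliteration of Source B's recursive helper go: r[1:] is List.drop 1 and
-- r[:w] (w ≥ 0) is List.take w (exact for these slice forms); r[0] inside the
-- nonempty-first-row branch is headD (placeholder default, unreachable inside Pre_).
def qu_chong_go (default : Int) (rows : List (List (Int × Int))) : List (List Int) :=
  if rows = [] ∨ rows.headD [] = [] then rows.map (fun _ => ([] : List Int))
  else
    let heads : List Int := rows.map (fun r => (r.headD ((0 : Int), (0 : Int))).2)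
    let tails := qu_chong_go default (rows.map (fun r => r.drop 1))
    if heads.contains default then tails
    else List.zipWith (fun h t => h :: t) heads tails
termination_by (rows.headD []).length
decreasing_by
  cases rows with
  | nil => simp at *
  | cons r rs =>
    cases r with
    | nil => simp at *
    | cons a as => simp

def qu_chong_alt (l : List (List (Int × Int))) (default : Int) : List (List Int) :=
  let w := (l.headD []).length
  qu_chong_go default (l.map (fun r => r.take w))

-- ===== PRECONDITION & SPEC =====
-- Python A raises IndexError iff l is empty (l[0]) or some row is shorter than l[0]
-- (l[j][i]); Pre_ excludes exactly those inputs and nothing else.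
def Pre_qu_chong (l : List (List (Int × Int))) (default : Int) : Prop :=
  l ≠ [] ∧ ∀ row ∈ l, (l.headD []).length ≤ row.length
instance (l : List (List (Int × Int))) (default : Int) : Decidable (Pre_qu_chong l default) := by
  unfold Pre_qu_chong; infer_instance

def pvWitness_qu_chong : (List (List (Int × Int))) × Int :=
  ([[(1, 2), (3, 0)], [(4, 5), (6, 7)]], 0)

def Spec_qu_chong (l : List (List (Int × Int))) (default : Int) (out : List (List Int)) : Prop := out = qu_chong_alt l default
instance (l : List (List (Int × Int))) (default : Int) (out : List (List Int)) : Decidable (Spec_qu_chong l default out) := by unfold Spec_qu_chong; infer_instance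

-- ===== CLAIM (what is proved, stated in full; the proofs are below) =====
def Claim_equal_qu_chong : Prop := ∀ (l : List (List (Int × Int))) (default : Int), Dom_qu_chong l default → Pre_qu_chong l default → Spec_qu_chong l default (qu_chong l default)

-- ===== LEMMAS AND PROOFS =====

-- the common closed form both ports are reduced to: per row, the second components at
-- the column indices i < w at which no row carries default
def pvCanon (l : List (List (Int × Int))) (default : Int) (w : Nat) : List (List Int) :=
  l.map (fun row =>
    (((List.range w).filter
        (fun i => l.all (fun r' => decide ((r'.getD i ((0 : Int), (0 : Int))).2 ≠ default)))).map
      (fun i => (row.getD i ((0 : Int), (0 : Int))).2)))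

-- the ifn flag fold computes 0/1 according to whether any row's entry equals default
theorem ifn_fold_eq {α : Type} (P : α → Prop) [DecidablePred P] :
    ∀ (l : List α) (a : Int),
      l.foldl (fun ifn row => if P row then 0 else ifn) a
        = if l.all (fun row => decide ¬ P row) then a else 0 := by
  intro l
  induction l with
  | nil => intro a; simp
  | cons x xs ih =>
    intro a
    by_cases h : P x <;> simp [h, ih]

-- zipWith with the first projection is the identity when lengths agree
theorem zipWith_fst_eq {α β : Type} :
    ∀ (acc : List α) (l : List β), acc.length = l.length →
      List.zipWith (fun r _ => r) acc l = acc := by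
  intro acc
  induction acc with
  | nil => intro l _; simp
  | cons a as ih =>
    intro l h
    cases l with
    | nil => simp at h
    | cons b bs => simp [ih bs (by simpa using h)]

-- two successive per-row appends fuse into one
theorem zipWith_append_append {α : Type} (u v : α → List Int) :
    ∀ (acc : List (List Int)) (l : List α),
      List.zipWith (fun r row => r ++ u row)
          (List.zipWith (fun r row => r ++ v row) acc l) l
        = List.zipWith (fun r row => r ++ (v row ++ u row)) acc l := by
  intro acc
  induction acc with
  | nil => intro l; simp
  | cons a as ih =>
    intro l
    cases l with
    | nil => simp
    | cons b bs => simp [ih bs]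

-- A's main loop invariant: folding its body over an index list appends, per row,
-- exactly the values at the indices that pass the predicate
theorem foldl_step_eq {α : Type} (l : List α) (p : Nat → Bool) (g : α → Nat → Int) :
    ∀ (is : List Nat) (acc : List (List Int)), acc.length = l.length →
      is.foldl (fun acc i =>
          if p i then List.zipWith (fun r row => r ++ [g row i]) acc l else acc) acc
        = List.zipWith (fun r row => r ++ (is.filter p).map (g row)) acc l := by
  intro is
  induction is with
  | nil =>
    intro acc h
    simp only [List.foldl_nil, List.filter_nil, List.map_nil, List.append_nil]
    exact (zipWith_fst_eq acc l h).symm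
  | cons i is ih =>
    intro is_acc h
    by_cases hp : p i = true
    · have hlen : (List.zipWith (fun r row => r ++ [g row i]) is_acc l).length = l.length := by
        simp [List.length_zipWith, h]
      simp only [List.foldl_cons, if_pos hp]
      rw [ih _ hlen, zipWith_append_append]
      simp [hp]
    · simp only [List.foldl_cons, if_neg hp]
      rw [ih _ h]
      simp [hp]

-- starting from one empty list per row, the zipWith form is a row-wise map
theorem zipWith_empty_map {α : Type} (f : α → List Int) :
    ∀ (l : List α),
      List.zipWith (fun r row => r ++ f row) (l.map (fun _ => ([] : List Int))) l
        = l.map (fun row => f row) := by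
  intro l
  induction l with
  | nil => simp
  | cons x xs ih =>
    simp only [List.map_cons, List.zipWith_cons_cons, ih]
    simp

-- A's port computes the closed form (unconditionally)
theorem qu_chong_eq_canon (l : List (List (Int × Int))) (default : Int) :
    qu_chong l default = pvCanon l default (l.headD []).length := by
  unfold qu_chong pvCanon
  rw [PySem.List.pyRange_zero_nat, List.foldl_map]
  refine Eq.trans (PySem.List.foldl_congr_mem _ _
      (fun acc i =>
        if l.all (fun row => (row.getD i ((0 : Int), (0 : Int))).2 ≠ default) then
          List.zipWith (fun r row => r ++ [(row.getD i ((0 : Int), (0 : Int))).2]) acc l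
        else acc) _ ?_) ?_
  · intro acc i _
    show (let ifn : Int := l.foldl (fun ifn row =>
            if (PySem.List.pyGetD row ((i : Nat) : Int) ((0:Int),(0:Int))).2 = default then 0
            else ifn) 1
          if ifn = 1 then
            List.zipWith (fun r row => r ++ [(PySem.List.pyGetD row ((i : Nat) : Int) ((0:Int),(0:Int))).2]) acc l
          else acc) = _
    simp only [PySem.List.pyGetD_natCast]
    rw [ifn_fold_eq (fun row => (row.getD i ((0:Int),(0:Int))).2 = default) l 1]
    simp
  · rw [foldl_step_eq l
        (fun i => l.all (fun row => (row.getD i ((0:Int),(0:Int))).2 ≠ default))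
        (fun row i => (row.getD i ((0:Int),(0:Int))).2)
        (List.range (l.headD []).length)
        (l.map (fun _ => ([] : List Int))) (by simp)]
    rw [zipWith_empty_map]

-- headD on a nonempty index-0 read agrees with getD 0
theorem headD_eq_getD_zero (r : List (Int × Int)) :
    r.headD ((0 : Int), (0 : Int)) = r.getD 0 ((0 : Int), (0 : Int)) := by
  cases r <;> simp [List.getD]

-- zipWith of two maps over the same list is a single map
theorem zipWith_map_same {α β γ δ : Type} (f : β → γ → δ) (g : α → β) (h : α → γ) :
    ∀ (l : List α), List.zipWith f (l.map g) (l.map h) = l.map (fun x => f (g x) (h x)) := by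
  intro l
  induction l with
  | nil => simp
  | cons x xs ih => simp [ih]

-- B's recursive column stripper computes the closed form on nonempty equal-width rows
theorem go_eq_canon (default : Int) :
    ∀ (n : Nat) (rows : List (List (Int × Int))), rows ≠ [] → (∀ r ∈ rows, r.length = n) →
      qu_chong_go default rows = pvCanon rows default n := by
  intro n
  induction n with
  | zero =>
    intro rows hne hlen
    rw [qu_chong_go, if_pos]
    · simp [pvCanon]
    · refine Or.inr ?_
      cases rows with
      | nil => simp at hne
      | cons r rs =>
        simpa using List.length_eq_zero_iff.mp (hlen r (by simp))
  | succ n ih =>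
    intro rows hne hlen
    have hh : rows.headD [] ≠ [] := by
      cases rows with
      | nil => simp at hne
      | cons r rs =>
        have := hlen r (by simp)
        rcases r with _ | ⟨a, as⟩
        · simp at this
        · simp
    rw [qu_chong_go, if_neg (by push Not; exact ⟨hne, hh⟩)]
    have htails := ih (rows.map (fun r => r.drop 1))
      (by cases rows with | nil => simp at hne | cons r rs => simp)
      (by intro r hr
          rcases List.mem_map.mp hr with ⟨r0, hr0, rfl⟩
          have := hlen r0 hr0
          simp [this])
    rw [htails]
    -- abbreviations
    set p1 : Nat → Bool :=
      fun i => rows.all (fun r' => decide ((r'.getD (i+1) ((0:Int),(0:Int))).2 ≠ default)) with hp1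
    -- the canon over dropped rows equals the shifted canon over rows
    have hshift : pvCanon (rows.map (fun r => r.drop 1)) default n
        = rows.map (fun row => (((List.range n).filter p1).map
            (fun i => (row.getD (i+1) ((0:Int),(0:Int))).2))) := by
      unfold pvCanon
      rw [List.map_map]
      refine List.map_congr_left ?_
      intro row hrow
      simp only [Function.comp]
      rw [show ((List.range n).filter (fun i => (rows.map (fun r => r.drop 1)).all
            (fun r' => decide ((r'.getD i ((0:Int),(0:Int))).2 ≠ default))))
          = (List.range n).filter p1 from
        List.filter_congr (by
          intro i _
          simp [List.all_map, Function.comp_def, List.getD, List.getElem?_tail, hp1])]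
      refine List.map_congr_left ?_
      intro i _
      simp [List.getD, List.getElem?_tail]
    rw [hshift]
    -- rewrite the closed form at width n+1 into head column + shifted columns
    have hcanon : pvCanon rows default (n+1)
        = (if rows.all (fun r' => decide ((r'.getD 0 ((0:Int),(0:Int))).2 ≠ default)) then
            rows.map (fun row => (row.getD 0 ((0:Int),(0:Int))).2
              :: ((List.range n).filter p1).map (fun i => (row.getD (i+1) ((0:Int),(0:Int))).2))
          else
            rows.map (fun row => ((List.range n).filter p1).map
              (fun i => (row.getD (i+1) ((0:Int),(0:Int))).2))) := by
      unfold pvCanon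
      rw [List.range_succ_eq_map, List.filter_cons]
      by_cases h0 : rows.all (fun r' => decide ((r'.getD 0 ((0:Int),(0:Int))).2 ≠ default)) = true
      · rw [if_pos h0, if_pos h0]
        simp [List.filter_map, Function.comp_def, hp1]
      · rw [if_neg h0, if_neg h0]
        simp [List.filter_map, Function.comp_def, hp1]
    rw [hcanon]
    -- the contains-test decides which branch both sides take
    have hcont : ((rows.map (fun r => (r.headD ((0:Int),(0:Int))).2)).contains default = true)
        ↔ ∃ r ∈ rows, (r.headD ((0:Int),(0:Int))).2 = default := by simp
    by_cases h0 : rows.all (fun r' => decide ((r'.getD 0 ((0:Int),(0:Int))).2 ≠ default)) = true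
    · rw [if_neg, if_pos h0]
      · rw [zipWith_map_same]
        refine List.map_congr_left ?_
        intro row _
        rw [headD_eq_getD_zero]
      · rw [hcont]
        rintro ⟨r, hr, hv⟩
        have := List.all_eq_true.mp h0 r hr
        rw [headD_eq_getD_zero] at hv
        have hne2 : ¬(r[0]?.getD ((0:Int),(0:Int))).2 = default := by simpa using this
        exact hne2 (by simpa [List.getD] using hv)
    · rw [if_pos, if_neg h0]
      rw [hcont]
      rcases (by simpa [List.all_eq_true] using h0 :
          ∃ x ∈ rows, (x[0]?.getD ((0:Int),(0:Int))).2 = default) with ⟨r, hr, hv⟩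
      refine ⟨r, hr, ?_⟩
      have hrlen := hlen r hr
      cases r with
      | nil => simp at hrlen
      | cons a as => simpa using hv

-- getD is unchanged by take w at indices below w
theorem getD_take_lt (r : List (Int × Int)) (w i : Nat) (h : i < w) :
    (r.take w).getD i ((0 : Int), (0 : Int)) = r.getD i ((0 : Int), (0 : Int)) := by
  simp [List.getD, List.getElem?_take_of_lt h]

-- on Pre_, B's port also computes the closed form at width len(l[0])
theorem alt_eq_canon (l : List (List (Int × Int))) (default : Int)
    (hne : l ≠ []) (hlen : ∀ row ∈ l, (l.headD []).length ≤ row.length) :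
    qu_chong_alt l default = pvCanon l default (l.headD []).length := by
  unfold qu_chong_alt
  set w := (l.headD []).length with hw
  rw [go_eq_canon default w (l.map (fun r => r.take w))
      (by cases l with | nil => simp at hne | cons r rs => simp)
      (by intro r hr
          rcases List.mem_map.mp hr with ⟨r0, hr0, rfl⟩
          have := hlen r0 hr0
          simp [List.length_take]; omega)]
  unfold pvCanon
  rw [List.map_map]
  refine List.map_congr_left ?_
  intro row hrow
  simp only [Function.comp]
  rw [show ((List.range w).filter (fun i => (l.map (fun r => r.take w)).all
        (fun r' => decide ((r'.getD i ((0:Int),(0:Int))).2 ≠ default))))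
      = (List.range w).filter (fun i => l.all
        (fun r' => decide ((r'.getD i ((0:Int),(0:Int))).2 ≠ default))) from
    List.filter_congr (by
      intro i hi
      have hiw : i < w := List.mem_range.mp hi
      simp [List.all_map, Function.comp_def, List.getElem?_take_of_lt hiw])]
  refine List.map_congr_left ?_
  intro i hi
  have hiw : i < w := List.mem_range.mp (List.mem_filter.mp hi).1
  rw [getD_take_lt _ _ _ hiw]

-- ===== VERDICT (by name: the statement is the Claim_ definition above) =====
theorem qu_chong_spec : Claim_equal_qu_chong := by
  intro l default _ hpre
  show qu_chong l default = qu_chong_alt l default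
  rw [qu_chong_eq_canon, alt_eq_canon l default hpre.1 hpre.2]
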